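-- pv_equiv track=rewrite | github.com/Gangto326/Algorithm | Python/Programmers_리프 노드 수 최대화.py | solution
-- ===== SOURCE A (Python) =====
-- def solution(dist_limit, split_limit):
--     answer = 0
--
--     two_count = 0
--     while (2 ** two_count) <= split_limit:
--         three_count = 0
--
--         while (2 ** two_count) * (3 ** three_count) <= split_limit:
--             count = 1
--             dists = dist_limit
--             cap = 1
--
--             for _ in range(two_count):
--                 if dists == 0:
--                     break
--
--                 use = min(cap, dists)
--                 count += use * 1
--                 cap = use * 2
--                 dists -= use
--
--             for _ in range(three_count):
--                 if dists == 0: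
--                     break
--
--                 use = min(cap, dists)
--                 count += use * 2
--                 cap = use * 3
--                 dists -= use
--
--             answer = max(answer, count)
--             three_count += 1
--
--         two_count += 1
--
--     return answer
-- ===== SOURCE B (Python) =====
-- def solution(dist_limit, split_limit):
--     def phase(cap, dists, n, m):
--         # closed-form geometric phase: count full (unclamped) steps, then one clamped step
--         if n == 0 or dists == 0:
--             return 0, cap, dists
--         k = 0
--         while k < n and cap * (m ** (k + 1) - 1) // (m - 1) <= dists:
--             k += 1
--         added = cap * (m ** k - 1)
--         rem = dists - cap * (m ** k - 1) // (m - 1)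
--         cap = cap * m ** k
--         if k < n and rem != 0:
--             added += rem * (m - 1)
--             cap = rem * m
--             rem = 0
--         return added, cap, rem
--
--     best = 0
--     t = 0
--     while 2 ** t <= split_limit:
--         s = 0
--         while 2 ** t * 3 ** s <= split_limit:
--             a1, cap, dists = phase(1, dist_limit, t, 2)
--             a2, cap, dists = phase(cap, dists, s, 3)
--             best = max(best, 1 + a1 + a2)
--             s += 1
--         t += 1
--     return best
-- ===== Notes on version B (the rewrite author's own statement) =====
-- stated objective: alternative
-- what changed: The two per-pair inner simulation loops (step-by-step min/count/cap/dists updates) are replaced by one closed-form geometric phase helper that counts the unclamped steps and then applies the geometric-sum formula plus a single clamped step.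
import Mathlib
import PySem

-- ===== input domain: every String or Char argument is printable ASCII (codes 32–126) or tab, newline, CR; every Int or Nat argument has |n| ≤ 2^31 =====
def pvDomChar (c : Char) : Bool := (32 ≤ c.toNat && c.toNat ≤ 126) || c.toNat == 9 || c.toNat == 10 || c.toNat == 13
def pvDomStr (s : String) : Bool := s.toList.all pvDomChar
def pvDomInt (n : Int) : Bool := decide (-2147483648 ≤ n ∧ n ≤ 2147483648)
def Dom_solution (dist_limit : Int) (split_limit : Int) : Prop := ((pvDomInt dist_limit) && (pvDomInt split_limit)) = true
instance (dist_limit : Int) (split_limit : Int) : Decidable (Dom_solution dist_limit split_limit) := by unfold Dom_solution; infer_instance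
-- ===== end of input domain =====

-- B replaces A's per-step split simulation by a closed-form geometric phase
-- (count the unclamped steps, then apply the sum formula and one clamped step);
-- objective: alternative (same asymptotic cost, different algorithm).
-- While loops are ported as fueled structural recursion; the fuel (sl.toNat + 1 - counter,
-- resp. n - k) is a totality guard only: it never runs out while the loop condition holds.

-- ===== PORT A =====
-- the first inner for-loop of A (state: count, dists, cap; break on dists == 0)
def loopA2 : Nat → Int × Int × Int → Int × Int × Int
  | 0, st => st
  | n+1, (count, dists, cap) =>
    if dists = 0 then (count, dists, cap)
    else
      let use := min cap dists
      loopA2 n (count + use * 1, dists - use, use * 2)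

-- the second inner for-loop of A
def loopA3 : Nat → Int × Int × Int → Int × Int × Int
  | 0, st => st
  | n+1, (count, dists, cap) =>
    if dists = 0 then (count, dists, cap)
    else
      let use := min cap dists
      loopA3 n (count + use * 2, dists - use, use * 3)

-- A's inner while loop over three_count (s); first Nat argument is fuel
def innerA (dl sl : Int) (t : Nat) : Nat → Nat → Int → Int
  | 0, _, answer => answer
  | f+1, s, answer =>
    if (2:Int) ^ t * 3 ^ s ≤ sl then
      innerA dl sl t f (s+1) (max answer (loopA3 s (loopA2 t (1, dl, 1))).1)
    else answer

-- A's outer while loop over two_count (t); first Nat argument is fuel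
def outerA (dl sl : Int) : Nat → Nat → Int → Int
  | 0, _, answer => answer
  | f+1, t, answer =>
    if (2:Int) ^ t ≤ sl then
      outerA dl sl f (t+1) (innerA dl sl t (sl.toNat + 1) 0 answer)
    else answer

def solution (dist_limit : Int) (split_limit : Int) : Int :=
  outerA dist_limit split_limit (split_limit.toNat + 1) 0 0

-- ===== PORT B =====
-- Source B's k-search loop (number of unclamped full steps, at most n); first Nat argument is fuel
def kloopB (cap dists m : Int) (n : Nat) : Nat → Nat → Nat
  | 0, k => k
  | f+1, k =>
    if k < n ∧ PySem.Int.floordiv (cap * (m ^ (k+1) - 1)) (m - 1) ≤ dists then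
      kloopB cap dists m n f (k+1)
    else k

-- Source B's phase helper: closed-form geometric phase, returns (added, cap, dists)
def phaseB (cap dists : Int) (n : Nat) (m : Int) : Int × Int × Int :=
  if n = 0 ∨ dists = 0 then (0, cap, dists)
  else
    let k := kloopB cap dists m n n 0
    let added := cap * (m ^ k - 1)
    let rem := dists - PySem.Int.floordiv (cap * (m ^ k - 1)) (m - 1)
    let cap' := cap * m ^ k
    if k < n ∧ rem ≠ 0 then (added + rem * (m - 1), rem * m, 0)
    else (added, cap', rem)

def innerB (dl sl : Int) (t : Nat) : Nat → Nat → Int → Int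
  | 0, _, best => best
  | f+1, s, best =>
    if (2:Int) ^ t * 3 ^ s ≤ sl then
      let p1 := phaseB 1 dl t 2
      let p2 := phaseB p1.2.1 p1.2.2 s 3
      innerB dl sl t f (s+1) (max best (1 + p1.1 + p2.1))
    else best

def outerB (dl sl : Int) : Nat → Nat → Int → Int
  | 0, _, best => best
  | f+1, t, best =>
    if (2:Int) ^ t ≤ sl then
      outerB dl sl f (t+1) (innerB dl sl t (sl.toNat + 1) 0 best)
    else best

def solution_alt (dist_limit : Int) (split_limit : Int) : Int :=
  outerB dist_limit split_limit (split_limit.toNat + 1) 0 0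

-- ===== PRECONDITION & SPEC =====
def Spec_solution (dist_limit : Int) (split_limit : Int) (out : Int) : Prop := out = solution_alt dist_limit split_limit
instance (dist_limit : Int) (split_limit : Int) (out : Int) : Decidable (Spec_solution dist_limit split_limit out) := by unfold Spec_solution; infer_instance

-- ===== CLAIM (what is proved, stated in full; the proofs are below) =====
def Claim_equal_solution : Prop := ∀ (dist_limit : Int) (split_limit : Int), Dom_solution dist_limit split_limit → Spec_solution dist_limit split_limit (solution dist_limit split_limit)

-- ===== LEMMAS AND PROOFS =====

-- geometric sum 1 + m + ... + m^(k-1)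
def G (m : Int) : Nat → Int
  | 0 => 0
  | k+1 => 1 + m * G m k

lemma G_mul (m : Int) : ∀ k, G m k * (m - 1) = m ^ k - 1
  | 0 => by simp [G]
  | k+1 => by
    have ih := G_mul m k
    simp only [G, pow_succ]
    linear_combination m * ih

lemma fdiv_G (cap m : Int) (hm : 2 ≤ m) (k : Nat) :
    PySem.Int.floordiv (cap * (m ^ k - 1)) (m - 1) = cap * G m k := by
  rw [← G_mul m k, show cap * (G m k * (m - 1)) = (cap * G m k) * (m - 1) by ring,
    PySem.Int.floordiv_eq_ediv_of_pos (by omega)]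
  exact Int.mul_ediv_cancel _ (by omega)

-- generic simulated phase (A's inner loops, with the count contribution separated out)
def gsim (m : Int) : Nat → Int → Int → Int × Int × Int
  | 0, cap, dists => (0, cap, dists)
  | n+1, cap, dists =>
    if dists = 0 then (0, cap, dists)
    else
      let u := min cap dists
      let r := gsim m n (u * m) (dists - u)
      (u * (m - 1) + r.1, r.2.1, r.2.2)

lemma gsim_zero (m : Int) (n : Nat) (cap : Int) : gsim m n cap 0 = (0, cap, 0) := by
  cases n <;> simp [gsim]

lemma kshift (cap dists m : Int) (hm : 2 ≤ m) (n : Nat) :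
    ∀ f j, kloopB cap dists m (n+1) f (j+1) = 1 + kloopB (cap*m) (dists-cap) m n f j := by
  intro f
  induction f with
  | zero => intro j; simp [kloopB]; omega
  | succ f ih =>
    intro j
    have hcond : PySem.Int.floordiv (cap * (m ^ (j+1+1) - 1)) (m - 1) ≤ dists ↔
        PySem.Int.floordiv ((cap*m) * (m ^ (j+1) - 1)) (m - 1) ≤ dists - cap := by
      rw [fdiv_G _ _ hm, fdiv_G _ _ hm]
      have hG : cap * G m (j+1+1) = cap + cap * m * G m (j+1) := by
        simp only [G]; ring
      constructor <;> intro h <;> nlinarith [hG]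
    simp only [kloopB]
    by_cases hc : PySem.Int.floordiv (cap * (m ^ (j+1+1) - 1)) (m - 1) ≤ dists
    · by_cases hj : j < n
      · rw [if_pos ⟨by omega, hc⟩, if_pos ⟨hj, hcond.mp hc⟩]
        exact ih (j+1)
      · rw [if_neg (fun h => hj (by omega)), if_neg (fun h => hj h.1)]
        omega
    · rw [if_neg (fun h => hc h.2), if_neg (fun h => hc (hcond.mpr h.2))]
      omega

lemma k_dec (cap dists m : Int) (hm : 2 ≤ m) (hc : cap ≤ dists) (n : Nat) :
    kloopB cap dists m (n+1) (n+1) 0 = 1 + kloopB (cap*m) (dists-cap) m n n 0 := by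
  have h0 : PySem.Int.floordiv (cap * (m ^ (0+1) - 1)) (m - 1) ≤ dists := by
    rw [fdiv_G _ _ hm]; simp only [G]; simpa using hc
  simp only [kloopB]
  rw [if_pos ⟨by omega, h0⟩]
  exact kshift cap dists m hm n n 0

-- phaseB on the non-degenerate branch, with the divisions evaluated
lemma phaseB_full (cap dists m : Int) (hm : 2 ≤ m) (n : Nat) (hn : ¬ n = 0) (hd : ¬ dists = 0)
    (k : Nat) (hk : kloopB cap dists m n n 0 = k) :
    phaseB cap dists n m =
      if k < n ∧ dists - cap * G m k ≠ 0
      then (cap * (m ^ k - 1) + (dists - cap * G m k) * (m - 1), (dists - cap * G m k) * m, 0)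
      else (cap * (m ^ k - 1), cap * m ^ k, dists - cap * G m k) := by
  rw [phaseB, if_neg (by simp [hn, hd])]
  simp only [hk, fdiv_G cap m hm]

lemma phaseB_dists_zero (cap : Int) (n : Nat) (m : Int) : phaseB cap 0 n m = (0, cap, 0) := by
  rw [phaseB, if_pos (Or.inr rfl)]

lemma phaseB_n_zero (cap dists m : Int) : phaseB cap dists 0 m = (0, cap, dists) := by
  rw [phaseB, if_pos (Or.inl rfl)]

lemma gsim_eq_phase (m : Int) (hm : 2 ≤ m) :
    ∀ n cap dists, 1 ≤ cap → gsim m n cap dists = phaseB cap dists n m := by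
  intro n
  induction n with
  | zero => intro cap dists _; rw [phaseB_n_zero]; rfl
  | succ n ih =>
    intro cap dists hcap
    by_cases hd : dists = 0
    · subst hd; rw [phaseB_dists_zero, gsim_zero]
    by_cases hcd : cap ≤ dists
    · -- full first step
      have hmin : min cap dists = cap := min_eq_left hcd
      simp only [gsim, if_neg hd, hmin]
      by_cases hn : n = 0
      · subst hn
        have hk : kloopB cap dists m 1 1 0 = 1 := by
          rw [k_dec cap dists m hm hcd 0]; rfl
        rw [phaseB_full cap dists m hm 1 (by omega) hd 1 hk]
        rw [if_neg (fun h => absurd h.1 (by omega))]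
        simp only [gsim, G, Prod.mk.injEq]
        try and_intros <;> first | trivial | ring
      · have hk' : kloopB cap dists m (n+1) (n+1) 0 = kloopB (cap*m) (dists-cap) m n n 0 + 1 := by
          rw [k_dec cap dists m hm hcd n]; omega
        set k' := kloopB (cap*m) (dists-cap) m n n 0 with hkdef
        rw [phaseB_full cap dists m hm (n+1) (by omega) hd (k'+1) hk']
        rw [ih (cap*m) (dists-cap) (by nlinarith)]
        by_cases hdc : dists - cap = 0
        · -- the recursive phase sees dists = 0
          have hk0 : k' = 0 := by
            obtain ⟨n', rfl⟩ := Nat.exists_eq_succ_of_ne_zero hn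
            rw [hkdef]
            simp only [kloopB]
            rw [if_neg]
            intro h
            have h2 := h.2
            rw [fdiv_G _ _ hm] at h2
            simp only [G] at h2
            nlinarith [h2]
          rw [hdc, phaseB_dists_zero, hk0]
          have hrem : dists - cap * G m (0+1) = 0 := by simp only [G]; nlinarith [hdc]
          rw [if_neg (fun h => h.2 hrem), hrem]
          simp only [Prod.mk.injEq]
          try and_intros <;> first | trivial | ring
        · -- the recursive phase takes its non-degenerate branch too
          rw [phaseB_full (cap*m) (dists-cap) m hm n hn hdc k' rfl]
          have hGs : G m (k'+1) = 1 + m * G m k' := by simp only [G]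
          have hrem : dists - cap * G m (k'+1) = (dists - cap) - (cap*m) * G m k' := by
            rw [hGs]; ring
          by_cases hcl : k' < n ∧ (dists - cap) - (cap*m) * G m k' ≠ 0
          · rw [if_pos hcl, if_pos ⟨by omega, by rw [hrem]; exact hcl.2⟩]
            simp only [Prod.mk.injEq, G]
            try and_intros <;> first | trivial | ring
          · rw [if_neg hcl, if_neg (fun h => hcl ⟨by omega, by rw [hrem] at h; exact h.2⟩)]
            simp only [Prod.mk.injEq, G]
            try and_intros <;> first | trivial | ring
    · -- clamped first step
      have hmin : min cap dists = dists := min_eq_right (by omega)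
      simp only [gsim, if_neg hd, hmin]
      rw [show dists - dists = 0 by ring, gsim_zero]
      have hk0 : kloopB cap dists m (n+1) (n+1) 0 = 0 := by
        simp only [kloopB]
        rw [if_neg]
        intro h
        have h2 := h.2
        rw [fdiv_G _ _ hm] at h2
        simp only [G] at h2
        nlinarith [h2]
      rw [phaseB_full cap dists m hm (n+1) (by omega) hd 0 hk0]
      have hrem : dists - cap * G m 0 = dists := by simp only [G]; ring
      rw [if_pos ⟨by omega, by rw [hrem]; exact hd⟩]
      simp only [Prod.mk.injEq, G]
      try and_intros <;> first | trivial | ring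

lemma gsim_cap_pos (m : Int) (hm : 2 ≤ m) :
    ∀ n cap dists, 1 ≤ cap → (gsim m n cap dists).2.2 ≠ 0 → 1 ≤ (gsim m n cap dists).2.1 := by
  intro n
  induction n with
  | zero => intro cap dists hcap _; simpa [gsim] using hcap
  | succ n ih =>
    intro cap dists hcap hne
    by_cases hd : dists = 0
    · subst hd; simp [gsim] at hne
    by_cases hcd : cap ≤ dists
    · have hmin : min cap dists = cap := min_eq_left hcd
      simp only [gsim, if_neg hd, hmin] at hne ⊢
      exact ih (cap * m) (dists - cap) (by nlinarith) hne
    · have hmin : min cap dists = dists := min_eq_right (by omega)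
      simp only [gsim, if_neg hd, hmin] at hne
      rw [show dists - dists = 0 by ring, gsim_zero] at hne
      simp at hne

lemma loopA2_gsim : ∀ n count dists cap, loopA2 n (count, dists, cap) =
    ((gsim 2 n cap dists).1 + count, (gsim 2 n cap dists).2.2, (gsim 2 n cap dists).2.1) := by
  intro n
  induction n with
  | zero => intro count dists cap; simp [loopA2, gsim]
  | succ n ih =>
    intro count dists cap
    by_cases hd : dists = 0
    · subst hd; simp [loopA2, gsim]
    · simp only [loopA2, gsim, if_neg hd]
      rw [ih]
      simp only [Prod.mk.injEq]
      try and_intros <;> first | trivial | ring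

lemma loopA3_gsim : ∀ n count dists cap, loopA3 n (count, dists, cap) =
    ((gsim 3 n cap dists).1 + count, (gsim 3 n cap dists).2.2, (gsim 3 n cap dists).2.1) := by
  intro n
  induction n with
  | zero => intro count dists cap; simp [loopA3, gsim]
  | succ n ih =>
    intro count dists cap
    by_cases hd : dists = 0
    · subst hd; simp [loopA3, gsim]
    · simp only [loopA3, gsim, if_neg hd]
      rw [ih]
      simp only [Prod.mk.injEq]
      try and_intros <;> first | trivial | ring

lemma pair_eq (dl : Int) (t s : Nat) :
    (loopA3 s (loopA2 t (1, dl, 1))).1 =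
    1 + (phaseB 1 dl t 2).1 + (phaseB (phaseB 1 dl t 2).2.1 (phaseB 1 dl t 2).2.2 s 3).1 := by
  have h2 : phaseB 1 dl t 2 = gsim 2 t 1 dl := (gsim_eq_phase 2 (by norm_num) t 1 dl (by norm_num)).symm
  rw [loopA2_gsim, loopA3_gsim, h2]
  set g2 := gsim 2 t 1 dl with hg2
  by_cases hz : g2.2.2 = 0
  · rw [hz, gsim_zero, phaseB_dists_zero]
    ring
  · have hcap : 1 ≤ g2.2.1 := gsim_cap_pos 2 (by norm_num) t 1 dl (by norm_num) hz
    rw [← gsim_eq_phase 3 (by norm_num) s g2.2.1 g2.2.2 hcap]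
    ring

lemma inner_eq (dl sl : Int) (t : Nat) :
    ∀ f s best, innerA dl sl t f s best = innerB dl sl t f s best := by
  intro f
  induction f with
  | zero => intro s best; rfl
  | succ f ih =>
    intro s best
    simp only [innerA, innerB]
    by_cases hc : (2:Int) ^ t * 3 ^ s ≤ sl
    · rw [if_pos hc, if_pos hc, pair_eq]
      exact ih (s+1) _
    · rw [if_neg hc, if_neg hc]

lemma outer_eq (dl sl : Int) :
    ∀ f t best, outerA dl sl f t best = outerB dl sl f t best := by
  intro f
  induction f with
  | zero => intro t best; rfl
  | succ f ih =>
    intro t best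
    simp only [outerA, outerB]
    by_cases hc : (2:Int) ^ t ≤ sl
    · rw [if_pos hc, if_pos hc, inner_eq]
      exact ih (t+1) _
    · rw [if_neg hc, if_neg hc]

-- ===== VERDICT (by name: the statement is the Claim_ definition above) =====
theorem solution_spec : Claim_equal_solution := by
  intro dl sl _
  unfold Spec_solution solution solution_alt
  exact outer_eq dl sl (sl.toNat + 1) 0 0
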